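-- pv_equiv track=rewrite | github.com/AtoBrightSide/contests | pastContests/A_Deletions_of_Two_Adjacent_Letters.py | solution
-- ===== SOURCE A (Python) =====
-- def solution(s, c):
--     if len(s) == 1:
--         return "YES" if s == c else "NO"
--
--     L = len(s)
--     for i, ch in enumerate(s):
--         if ch == c:
--             if i % 2 == 0 and (L - i - 1) % 2 == 0:
--                 return "YES"
--
--     return "NO"
-- ===== SOURCE B (Python) =====
-- def solution(s, c):
--     # "YES" is reachable only when len(s) is odd, and then exactly when some
--     # even-index character equals c; the len==1 case is subsumed.
--     if len(s) % 2 == 0: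
--         return "NO"
--     return "YES" if any(ch == c for ch in s[::2]) else "NO"
-- ===== Notes on version B (the rewrite author's own statement) =====
-- stated objective: simpler
-- what changed: Replaces the indexed scan with dual parity tests (and its len==1 special case) by a single length-parity check plus an element-wise scan of the even-index slice s[::2].
import Mathlib
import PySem

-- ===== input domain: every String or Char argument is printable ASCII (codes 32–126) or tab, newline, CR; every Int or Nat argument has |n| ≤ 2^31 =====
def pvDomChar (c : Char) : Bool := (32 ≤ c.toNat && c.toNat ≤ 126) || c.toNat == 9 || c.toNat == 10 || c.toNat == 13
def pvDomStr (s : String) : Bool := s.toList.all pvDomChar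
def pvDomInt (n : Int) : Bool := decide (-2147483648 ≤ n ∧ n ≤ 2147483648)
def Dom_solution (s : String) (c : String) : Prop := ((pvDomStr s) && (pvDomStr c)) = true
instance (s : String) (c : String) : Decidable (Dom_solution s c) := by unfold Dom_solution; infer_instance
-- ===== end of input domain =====

-- B replaces A's indexed scan with dual parity tests (plus its len==1 special case)
-- by one length-parity check and an element-wise scan of the even-index slice s[::2]; simpler, same cost.

-- ===== PORT A =====
-- the for-loop of A over enumerate(s)
def solutionGo (c : String) (L : Int) : List (Int × Char) → String
  | [] => "NO"
  | (i, ch) :: rest =>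
      if String.ofList [ch] == c then
        if i % 2 == 0 && (L - i - 1) % 2 == 0 then "YES"
        else solutionGo c L rest
      else solutionGo c L rest

def solution (s : String) (c : String) : String :=
  if s.toList.length == 1 then (if s == c then "YES" else "NO")
  else
    solutionGo c (s.toList.length : Int) (PySem.List.enumerate s.toList 0)

-- ===== PORT B =====
def solution_alt (s : String) (c : String) : String :=
  if s.toList.length % 2 == 0 then "NO"
  else if ((PySem.List.slice? s.toList none none 2).getD []).any
            (fun ch => String.ofList [ch] == c) then "YES"
  else "NO"

-- ===== PRECONDITION & SPEC =====
def Spec_solution (s : String) (c : String) (out : String) : Prop := out = solution_alt s c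
instance (s : String) (c : String) (out : String) : Decidable (Spec_solution s c out) := by unfold Spec_solution; infer_instance

-- ===== CLAIM (what is proved, stated in full; the proofs are below) =====
def Claim_equal_solution : Prop := ∀ (s : String) (c : String), Dom_solution s c → Spec_solution s c (solution s c)

-- ===== LEMMAS AND PROOFS =====

-- A's loop is an "any" over enumerate(s)
theorem solutionGo_eq_any (c : String) (L : Int) (ps : List (Int × Char)) :
    solutionGo c L ps =
      if ps.any (fun p => (String.ofList [p.2] == c) && ((p.1 % 2 == 0) && ((L - p.1 - 1) % 2 == 0)))
      then "YES" else "NO" := by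
  induction ps with
  | nil => simp [solutionGo]
  | cons p rest ih =>
      obtain ⟨i, ch⟩ := p
      by_cases h1 : (String.ofList [ch] == c) = true
      · by_cases h2 : ((i % 2 == 0) && ((L - i - 1) % 2 == 0)) = true
        · simp [solutionGo, h1, h2]
        · rw [Bool.not_eq_true] at h2
          have hx : (String.ofList [ch] == c && (i % 2 == 0 && (L - i - 1) % 2 == 0)) = false := by
            simp [h2]
          simp only [List.any_cons, hx, Bool.false_or]
          simp [solutionGo, h1, h2, ih]
      · rw [Bool.not_eq_true] at h1
        have hx : (String.ofList [ch] == c && (i % 2 == 0 && (L - i - 1) % 2 == 0)) = false := by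
          simp [h1]
        simp only [List.any_cons, hx, Bool.false_or]
        simp [solutionGo, h1, ih]

-- s[::2] as a filterMap over the even indices
theorem slice2_eq {α : Type} (xs : List α) :
    (PySem.List.slice? xs none none 2).getD [] =
      List.filterMap (fun k => xs[2 * k]?) (List.range ((xs.length + 1) / 2)) := by
  have hidx : PySem.List.sliceIndices xs.length none none 2 = ((0:Int), (xs.length:Int), 2) := by
    simp [PySem.List.sliceIndices]
  simp only [PySem.List.slice?, hidx]
  norm_num
  have hc : (if 0 < xs.length then (((xs.length : Int) + 2 - 1) / 2).toNat else 0) = (xs.length + 1) / 2 := by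
    split_ifs with h <;> omega
  rw [hc]
  apply List.filterMap_congr
  intro k _
  congr 1

theorem slice2_any_iff {α : Type} (xs : List α) (q : α → Bool) :
    ((PySem.List.slice? xs none none 2).getD []).any q = true ↔
      ∃ k : Nat, ∃ h : 2 * k < xs.length, q xs[2 * k] = true := by
  rw [slice2_eq]
  simp only [List.any_eq_true, List.mem_filterMap, List.mem_range]
  constructor
  · rintro ⟨a, ⟨k, hk, hget⟩, hq⟩
    obtain ⟨hlt, rfl⟩ := List.getElem?_eq_some_iff.1 hget
    exact ⟨k, hlt, hq⟩
  · rintro ⟨k, hlt, hq⟩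
    exact ⟨xs[2 * k], ⟨k, by omega, List.getElem?_eq_getElem hlt⟩, hq⟩

theorem anyA_iff (l : List Char) (c : String) :
    (PySem.List.enumerate l 0).any
        (fun p => (String.ofList [p.2] == c) && ((p.1 % 2 == 0) && (((l.length : Int) - p.1 - 1) % 2 == 0))) = true ↔
      ∃ k : Nat, ∃ h : k < l.length,
        String.ofList [l[k]] = c ∧ (k : Int) % 2 = 0 ∧ ((l.length : Int) - k - 1) % 2 = 0 := by
  simp only [List.any_eq_true]
  constructor
  · rintro ⟨p, hp, hcond⟩
    obtain ⟨k, hk, rfl⟩ := (PySem.List.mem_enumerate_iff l 0 p).1 hp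
    simp only [zero_add] at hcond ⊢
    simp only [Bool.and_eq_true, beq_iff_eq] at hcond
    exact ⟨k, hk, hcond.1, by simpa using hcond.2.1, by simpa using hcond.2.2⟩
  · rintro ⟨k, hk, h1, h2, h3⟩
    refine ⟨((k : Int), l[k]), (PySem.List.mem_enumerate_iff l 0 _).2 ⟨k, hk, by simp⟩, ?_⟩
    simp [h1, h2, h3]

theorem exists_equiv (l : List Char) (c : String) (hodd : l.length % 2 = 1) :
    (∃ k : Nat, ∃ h : k < l.length,
        String.ofList [l[k]] = c ∧ (k : Int) % 2 = 0 ∧ ((l.length : Int) - k - 1) % 2 = 0) ↔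
      (∃ k : Nat, ∃ h : 2 * k < l.length, (String.ofList [l[2 * k]] == c) = true) := by
  constructor
  · rintro ⟨k, hk, h1, h2, h3⟩
    obtain ⟨j, rfl⟩ : ∃ j, k = 2 * j := ⟨k / 2, by omega⟩
    exact ⟨j, hk, by simpa using h1⟩
  · rintro ⟨k, hk, hq⟩
    refine ⟨2 * k, hk, by simpa using hq, by omega, by omega⟩

theorem solution_eq_alt (s c : String) : solution s c = solution_alt s c := by
  unfold solution solution_alt
  by_cases hone : (s.toList.length == 1) = true
  · -- A's len==1 special case is subsumed by B's general rule
    rw [if_pos hone]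
    replace hone : s.toList.length = 1 := by simpa using hone
    rw [if_neg (show ¬ (s.toList.length % 2 == 0) = true by simp [hone])]
    obtain ⟨a, ha⟩ := List.length_eq_one_iff.1 hone
    have hs : String.ofList [a] = s := String.ext (by simp [ha])
    have hB := slice2_any_iff s.toList (fun ch => String.ofList [ch] == c)
    have hiff : (s == c) = true ↔
        (((PySem.List.slice? s.toList none none 2).getD []).any
          (fun ch => String.ofList [ch] == c)) = true := by
      rw [hB]
      constructor
      · intro h
        refine ⟨0, by omega, ?_⟩
        have : s.toList[2 * 0]'(by omega) = a := by simp [ha]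
        rw [this]
        simp only [beq_iff_eq] at h ⊢
        rw [hs, h]
      · rintro ⟨k, hk, hq⟩
        have hk0 : k = 0 := by omega
        subst hk0
        have : s.toList[2 * 0]'(by omega) = a := by simp [ha]
        rw [this] at hq
        simp only [beq_iff_eq] at hq ⊢
        rw [← hs, hq]
    by_cases h : (s == c) = true
    · rw [if_pos h, if_pos (hiff.1 h)]
    · rw [if_neg h, if_neg (fun hb => h (hiff.2 hb))]
  · rw [if_neg hone, solutionGo_eq_any]
    replace hone : ¬ s.toList.length = 1 := by simpa using hone
    by_cases hodd : s.toList.length % 2 = 1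
    · rw [if_neg (show ¬ (s.toList.length % 2 == 0) = true by simp only [beq_iff_eq]; omega)]
      have hiff := (anyA_iff s.toList c).trans
        ((exists_equiv s.toList c hodd).trans
          (slice2_any_iff s.toList (fun ch => String.ofList [ch] == c)).symm)
      by_cases hA : ((PySem.List.enumerate s.toList 0).any
          (fun p => (String.ofList [p.2] == c) && ((p.1 % 2 == 0) && (((s.toList.length : Int) - p.1 - 1) % 2 == 0)))) = true
      · rw [if_pos hA, if_pos (hiff.1 hA)]
      · rw [if_neg hA, if_neg (fun hb => hA (hiff.2 hb))]
    · rw [if_pos (show (s.toList.length % 2 == 0) = true by simp only [beq_iff_eq]; omega)]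
      rw [if_neg]
      intro hA
      obtain ⟨k, hk, _, h2, h3⟩ := (anyA_iff s.toList c).1 hA
      omega

-- ===== VERDICT (by name: the statement is the Claim_ definition above) =====
theorem solution_spec : Claim_equal_solution := by
  intro s c _
  unfold Spec_solution
  exact solution_eq_alt s c
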